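-- pv_equiv track=rewrite | github.com/procr/leetcode | src/29_DivideTwoIntegers.py | divide
-- ===== SOURCE A (Python) =====
-- def divide(dividend, divisor):
--     sign = (dividend < 0 and divisor > 0) or (dividend > 0 and divisor < 0)
--     a, b = abs(dividend), abs(divisor)
--     ret = 0
--     base = [0] * 32
--
--     bb = b
--     i = 0
--     while a >= bb:
--         base[i] = bb
--         i += 1
--         bb <<= 1
--
--     i -= 1
--
--     while i >= 0:
--         if a >= base[i]:
--             a -= base[i]
--             ret += 1 << i
--
--         i -= 1
--
--     if sign:
--         ret = -ret
--
--     return min(max(-2147483648, ret), 2147483647)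
-- ===== SOURCE B (Python) =====
-- def _udiv(a, b):
--     # unsigned a // b without division: recursive doubling
--     if a < b:
--         return 0
--     q = _udiv(a, b << 1) << 1
--     r = a - b * q
--     if r >= b:
--         q += 1
--     return q
--
--
-- def divide(dividend, divisor):
--     sign = (dividend < 0) != (divisor < 0)
--     q = _udiv(abs(dividend), abs(divisor))
--     if sign:
--         q = -q
--     return min(max(-2147483648, q), 2147483647)
-- ===== Notes on version B (the rewrite author's own statement) =====
-- stated objective: simpler
-- what changed: Replaces A's two-phase table construction (a 32-slot list of doubled divisors filled by one loop and scanned backwards by a second) with a short recursive halving division: recurse on the doubled divisor and decide one quotient bit on return, so no array and no index bookkeeping.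
-- outside the precondition, e.g. on divide(5, 0): A raises IndexError, B raises RecursionError
import Mathlib
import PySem

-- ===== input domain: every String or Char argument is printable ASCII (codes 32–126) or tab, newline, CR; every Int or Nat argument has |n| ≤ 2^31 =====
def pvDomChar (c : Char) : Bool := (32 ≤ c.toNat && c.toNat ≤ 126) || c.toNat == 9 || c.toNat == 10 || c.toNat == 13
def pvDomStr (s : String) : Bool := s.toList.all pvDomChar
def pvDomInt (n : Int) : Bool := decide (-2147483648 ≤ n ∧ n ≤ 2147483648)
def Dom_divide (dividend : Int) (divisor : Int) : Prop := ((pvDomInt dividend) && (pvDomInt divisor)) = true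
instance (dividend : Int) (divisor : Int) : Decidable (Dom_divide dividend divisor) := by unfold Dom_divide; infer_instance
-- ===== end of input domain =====

-- B replaces A's 32-slot table of doubled divisors (built then scanned backwards) by a
-- recursive doubling division with no array; same results, same asymptotic cost.

-- ===== PORT A =====

-- first while loop: `while a >= bb: base[i] = bb; i += 1; bb <<= 1`
-- (fuel-bounded for totality; 33 iterations always suffice on the admitted domain)
def divideLoop1 : Nat → Int → Int → Nat → List Int → List Int × Nat
  | 0, _, _, i, base => (base, i)
  | f + 1, a, bb, i, base =>
    if bb ≤ a then divideLoop1 f a (bb * 2) (i + 1) (base.set i bb)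
    else (base, i)

-- second while loop, argument n = i + 1: `while i >= 0: if a >= base[i]: …; i -= 1`
def divideLoop2 (base : List Int) : Nat → Int → Int → Int × Int
  | 0, a, ret => (a, ret)
  | n + 1, a, ret =>
    let bi := base.getD n 0
    if bi ≤ a then divideLoop2 base n (a - bi) (ret + 2 ^ n)
    else divideLoop2 base n a ret

def divide (dividend : Int) (divisor : Int) : Int :=
  let sign := (decide (dividend < 0) && decide (divisor > 0)) ||
              (decide (dividend > 0) && decide (divisor < 0))
  let a := |dividend|
  let b := |divisor|
  let r1 := divideLoop1 33 a b 0 (List.replicate 32 0)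
  let r2 := divideLoop2 r1.1 r1.2 a 0
  let ret := if sign then -r2.2 else r2.2
  min (max (-2147483648) ret) 2147483647

-- ===== PORT B =====

-- _udiv, fuel-bounded for totality (64 levels always suffice on the admitted domain)
def udiv : Nat → Int → Int → Int
  | 0, _, _ => 0
  | f + 1, a, b =>
    if a < b then 0
    else
      let q := udiv f a (b * 2) * 2
      let r := a - b * q
      if b ≤ r then q + 1 else q

def divide_alt (dividend : Int) (divisor : Int) : Int :=
  let sign := decide (dividend < 0) != decide (divisor < 0)
  let q := udiv 64 |dividend| |divisor|
  let q := if sign then -q else q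
  min (max (-2147483648) q) 2147483647

-- ===== PRECONDITION & SPEC =====
-- Pre_ excludes divisor = 0, on which A raises IndexError (and B raises RecursionError).
def Pre_divide (dividend : Int) (divisor : Int) : Prop := divisor ≠ 0
instance (dividend : Int) (divisor : Int) : Decidable (Pre_divide dividend divisor) := by
  unfold Pre_divide; infer_instance

def pvWitness_divide : Int × Int := (7, -2)

def Spec_divide (dividend : Int) (divisor : Int) (out : Int) : Prop := out = divide_alt dividend divisor
instance (dividend : Int) (divisor : Int) (out : Int) : Decidable (Spec_divide dividend divisor out) := by unfold Spec_divide; infer_instance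

-- ===== CLAIM (what is proved, stated in full; the proofs are below) =====
def Claim_equal_divide : Prop := ∀ (dividend : Int) (divisor : Int), Dom_divide dividend divisor → Pre_divide dividend divisor → Spec_divide dividend divisor (divide dividend divisor)

-- ===== LEMMAS AND PROOFS =====

-- r / b for 0 ≤ r < 2b is the bit "b ≤ r"
theorem ediv_bit (r b : Int) (hb : 0 < b) (h0 : 0 ≤ r) (h2 : r < b * 2) :
    r / b = if b ≤ r then 1 else 0 := by
  split_ifs with h
  · have : r - b + b * 1 = r := by ring
    rw [← this, Int.add_mul_ediv_left _ _ (by omega : b ≠ 0),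
      Int.ediv_eq_zero_of_lt (by omega) (by omega)]
    norm_num
  · exact Int.ediv_eq_zero_of_lt h0 (by omega)

theorem udiv_spec : ∀ (f : Nat) (a b : Int), 0 < b → 0 ≤ a → a < b * 2 ^ f →
    udiv f a b = a / b := by
  intro f
  induction f with
  | zero =>
    intro a b hb ha hlt
    simp only [pow_zero, mul_one] at hlt
    simp [udiv, Int.ediv_eq_zero_of_lt ha hlt]
  | succ f ih =>
    intro a b hb ha hlt
    have hrec : udiv f a (b * 2) = a / (b * 2) := by
      apply ih a (b * 2) (by omega) ha
      have he : b * 2 * 2 ^ f = b * 2 ^ (f + 1) := by rw [pow_succ]; ring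
      linarith
    have hmod : a - b * (a / (b * 2) * 2) = a % (b * 2) := by
      rw [Int.emod_def]; ring
    have hm0 : 0 ≤ a % (b * 2) := Int.emod_nonneg a (by omega)
    have hm2 : a % (b * 2) < b * 2 := Int.emod_lt_of_pos a (by omega)
    have hdecomp : a = a % (b * 2) + b * (2 * (a / (b * 2))) := by
      have h1 := Int.emod_add_ediv a (b * 2)
      have h2 : b * 2 * (a / (b * 2)) = b * (2 * (a / (b * 2))) := by ring
      omega
    have hkey : a / b = a % (b * 2) / b + 2 * (a / (b * 2)) := by
      conv_lhs => rw [hdecomp]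
      exact Int.add_mul_ediv_left _ _ (by omega : b ≠ 0)
    simp only [udiv, hrec, hmod]
    rw [hkey, ediv_bit _ b hb hm0 hm2]
    split_ifs with h1 h2 h2
    · exfalso
      have : a % (b * 2) = a := Int.emod_eq_of_lt ha (by omega)
      omega
    · have h0 : a / (b * 2) = 0 := Int.ediv_eq_zero_of_lt ha (by omega)
      simp [h0]
    · ring
    · ring

theorem loop1_spec : ∀ (f : Nat) (a b : Int) (i : Nat) (base : List Int),
    0 < b → 0 ≤ a → a < 2 ^ 32 → a < b * 2 ^ i * 2 ^ f → base.length = 32 →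
    (∀ j, j < i → base.getD j 0 = b * 2 ^ j) →
    ∃ base' k, divideLoop1 f a (b * 2 ^ i) i base = (base', k) ∧
      a < b * 2 ^ k ∧ (∀ j, j < k → base'.getD j 0 = b * 2 ^ j) := by
  intro f
  induction f with
  | zero =>
    intro a b i base hb ha h32 hlt hlen hinv
    simp only [pow_zero, mul_one] at hlt
    exact ⟨base, i, rfl, hlt, hinv⟩
  | succ f ih =>
    intro a b i base hb ha h32 hlt hlen hinv
    simp only [divideLoop1]
    split_ifs with h
    · -- b * 2^i ≤ a : one more table entry
      have hi32 : i < 32 := by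
        by_contra hcon
        have h1 : (2 : Int) ^ 32 ≤ 2 ^ i := by
          exact pow_le_pow_right₀ (by norm_num) (by omega)
        have h2 : (2 : Int) ^ i ≤ b * 2 ^ i := by
          nlinarith [pow_pos (by norm_num : (0:Int) < 2) i]
        omega
      have hset : (base.set i (b * 2 ^ i)).length = 32 := by simp [hlen]
      have hinv' : ∀ j, j < i + 1 → (base.set i (b * 2 ^ i)).getD j 0 = b * 2 ^ j := by
        intro j hj
        rcases Nat.lt_succ_iff_lt_or_eq.mp hj with hj' | hj'
        · rw [List.getD, List.getElem?_set_ne (by omega)]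
          exact hinv j hj'
        · subst hj'
          rw [List.getD, List.getElem?_set_self (by omega)]
          rfl
      have hmul : b * 2 ^ i * 2 = b * 2 ^ (i + 1) := by ring
      have := ih a b (i + 1) (base.set i (b * 2 ^ i)) hb ha h32
        (by
          have he : b * 2 ^ (i + 1) * 2 ^ f = b * 2 ^ i * 2 ^ (f + 1) := by
            rw [pow_succ, pow_succ]; ring
          linarith) hset hinv'
      rw [hmul]
      exact this
    · exact ⟨base, i, rfl, by omega, hinv⟩

theorem loop2_spec : ∀ (n : Nat) (a ret b : Int) (base : List Int),
    0 < b → 0 ≤ a → a < b * 2 ^ n → (∀ j, j < n → base.getD j 0 = b * 2 ^ j) →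
    (divideLoop2 base n a ret).2 = ret + a / b := by
  intro n
  induction n with
  | zero =>
    intro a ret b base hb ha hlt hbase
    simp only [pow_zero, mul_one] at hlt
    simp [divideLoop2, Int.ediv_eq_zero_of_lt ha hlt]
  | succ n ih =>
    intro a ret b base hb ha hlt hbase
    simp only [divideLoop2, hbase n (by omega)]
    have hp : (0 : Int) < b * 2 ^ n := by positivity
    split_ifs with h
    · rw [ih (a - b * 2 ^ n) (ret + 2 ^ n) b base hb (by omega)
        (by rw [pow_succ] at hlt; nlinarith) (fun j hj => hbase j (by omega))]
      have : a / b = (a - b * 2 ^ n) / b + 2 ^ n := by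
        have he : a - b * 2 ^ n + b * 2 ^ n = a := by ring
        conv_lhs => rw [← he]
        exact Int.add_mul_ediv_left _ _ (by omega : b ≠ 0)
      rw [this]; ring
    · exact ih a ret b base hb ha (by omega) (fun j hj => hbase j (by omega))

-- ===== VERDICT (by name: the statement is the Claim_ definition above) =====
theorem divide_spec : Claim_equal_divide := by
  intro dividend divisor hdom hpre
  unfold Spec_divide divide divide_alt
  have hdom' : -2147483648 ≤ dividend ∧ dividend ≤ 2147483648 ∧
      -2147483648 ≤ divisor ∧ divisor ≤ 2147483648 := by
    unfold Dom_divide pvDomInt at hdom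
    simp only [Bool.and_eq_true, decide_eq_true_eq] at hdom
    exact ⟨hdom.1.1, hdom.1.2, hdom.2.1, hdom.2.2⟩
  have hb : 0 < |divisor| := abs_pos.mpr hpre
  have ha : 0 ≤ |dividend| := abs_nonneg _
  have h32 : |dividend| < 2 ^ 32 := by
    rw [abs_lt]; constructor <;> norm_num <;> omega
  -- A's quotient
  have hlt0 : |dividend| < |divisor| * 2 ^ 0 * 2 ^ 33 := by
    simp only [pow_zero, mul_one]
    have : (2 : Int) ^ 32 ≤ |divisor| * 2 ^ 33 := by
      have : (1 : Int) ≤ |divisor| := hb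
      nlinarith [pow_pos (by norm_num : (0:Int) < 2) 33,
        (by norm_num : (2:Int) ^ 33 = 2 * 2 ^ 32)]
    omega
  obtain ⟨base', k, heq, hk, hbase⟩ := loop1_spec 33 |dividend| |divisor| 0
    (List.replicate 32 0) hb ha h32 hlt0 (by simp) (by omega)
  have hA : (divideLoop2 (divideLoop1 33 |dividend| (|divisor|) 0 (List.replicate 32 0)).1
      (divideLoop1 33 |dividend| (|divisor|) 0 (List.replicate 32 0)).2 |dividend| 0).2
      = |dividend| / |divisor| := by
    have h0 : |divisor| * 2 ^ 0 = |divisor| := by ring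
    rw [← h0, heq]
    simpa using loop2_spec k |dividend| 0 |divisor| base' hb ha hk hbase
  -- B's quotient
  have hB : udiv 64 |dividend| |divisor| = |dividend| / |divisor| := by
    apply udiv_spec 64 _ _ hb ha
    have : (2 : Int) ^ 32 ≤ |divisor| * 2 ^ 64 := by
      have h1 : (1 : Int) ≤ |divisor| := hb
      nlinarith [pow_pos (by norm_num : (0:Int) < 2) 64,
        (by norm_num : (2:Int) ^ 32 ≤ 2 ^ 64)]
    omega
  simp only [hA, hB]
  -- sign reconciliation: they differ only when dividend = 0, where the quotient is 0
  rcases lt_trichotomy dividend 0 with hd | hd | hd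
  · rcases lt_trichotomy divisor 0 with hv | hv | hv
    · simp [hd, hv, not_lt.mpr (le_of_lt hv), not_lt.mpr (le_of_lt hd)]
    · exact absurd hv hpre
    · simp [hd, hv, not_lt.mpr (le_of_lt hv), not_lt.mpr (le_of_lt hd)]
  · subst hd
    simp
  · rcases lt_trichotomy divisor 0 with hv | hv | hv
    · simp [hd, hv, not_lt.mpr (le_of_lt hd)]
    · exact absurd hv hpre
    · simp [hd, hv, not_lt.mpr (le_of_lt hv), not_lt.mpr (le_of_lt hd)]
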